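-- pv_equiv track=rewrite | github.com/adobe-research/speaker-identification | joint_iterators.py | get_coref_list
-- ===== SOURCE A (Python) =====
-- import itertools
-- from collections import Counter, namedtuple, defaultdict
--
-- def get_coref_list(entities, vocab):
--     clusters = defaultdict(list)
--     coref_list = []
--     for i, entity in enumerate(entities):
--         entity_id = entity['entity_id']
--         cluster_id = entity_id[:entity_id.rfind('-')]
--         clusters[cluster_id].append(i)
--     for _, entities in clusters.items():
--         for i, j in itertools.combinations(entities, 2):
--             if i < j:
--                 coref_list.append((i, j, vocab['COREF']))
--             else:
--                 coref_list.append((j, i, vocab['COREF']))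
--     coref_list.sort(key=lambda x: (x[0], x[1]))
--     return coref_list
-- ===== SOURCE B (Python) =====
-- def get_coref_list(entities, vocab):
--     cluster_ids = []
--     for entity in entities:
--         entity_id = entity['entity_id']
--         cluster_ids.append(entity_id[:entity_id.rfind('-')])
--     n = len(cluster_ids)
--     out = []
--     for i in range(n):
--         for j in range(i + 1, n):
--             if cluster_ids[i] == cluster_ids[j]:
--                 out.append((i, j, vocab['COREF']))
--     return out
-- ===== Notes on version B (the rewrite author's own statement) =====
-- stated objective: alternative
-- what changed: Replaces the defaultdict grouping + itertools.combinations + final sort with a direct O(n^2) double loop over index pairs that emits matching pairs already in (i, j)-sorted order, so no dict, no combinations and no sort are needed.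
import Mathlib
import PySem

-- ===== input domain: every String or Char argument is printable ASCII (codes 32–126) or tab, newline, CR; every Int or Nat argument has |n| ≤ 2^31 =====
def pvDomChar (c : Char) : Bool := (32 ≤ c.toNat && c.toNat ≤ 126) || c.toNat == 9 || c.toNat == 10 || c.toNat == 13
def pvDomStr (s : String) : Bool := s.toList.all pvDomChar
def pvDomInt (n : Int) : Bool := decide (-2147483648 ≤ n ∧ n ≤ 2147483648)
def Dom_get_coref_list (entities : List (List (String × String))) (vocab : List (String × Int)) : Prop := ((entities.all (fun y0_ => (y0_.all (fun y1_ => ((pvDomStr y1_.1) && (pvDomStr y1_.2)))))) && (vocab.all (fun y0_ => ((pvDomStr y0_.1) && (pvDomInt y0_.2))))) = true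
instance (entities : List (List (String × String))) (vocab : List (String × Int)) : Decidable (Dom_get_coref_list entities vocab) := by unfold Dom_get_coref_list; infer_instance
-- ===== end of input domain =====

-- B replaces A's defaultdict grouping + itertools.combinations + final sort by a direct
-- double loop over index pairs (i, j), i < j, which emits the same pairs already in sorted
-- order (alternative decomposition; return-value equivalence).

-- Python dict lookup d[k] on an association list: first match (Pre_ guarantees the key is present).
def pvLookupD {α : Type} (d : List (String × α)) (k : String) (dflt : α) : α :=
  (((d.find? (fun p => p.1 == k)).map (fun p => p.2)).getD dflt)

-- cluster_id = entity_id[:entity_id.rfind('-')] for entity_id = entity['entity_id']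
def pvCid (entity : List (String × String)) : String :=
  let entity_id := pvLookupD entity "entity_id" ""
  PySem.Str.slice entity_id none (some (PySem.Str.rfind entity_id "-"))

-- ===== PORT A =====
-- itertools.combinations(l, 2), in itertools order
def pvComb2 {α : Type} : List α → List (α × α)
  | [] => []
  | x :: xs => (xs.map (fun y => (x, y))) ++ pvComb2 xs

def get_coref_list (entities : List (List (String × String))) (vocab : List (String × Int)) : List (Int × Int × Int) :=
  let clusters : PySem.Dict String (List Int) :=
    (PySem.List.enumerate entities).foldl
      (fun d p => d.modify (pvCid p.2) [] (fun l => l ++ [p.1])) PySem.Dict.empty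
  let coref_list : List (Int × Int × Int) :=
    clusters.items.foldl (fun acc kv =>
      acc ++ (pvComb2 kv.2).map (fun ij =>
        if ij.1 < ij.2 then (ij.1, ij.2, pvLookupD vocab "COREF" 0)
        else (ij.2, ij.1, pvLookupD vocab "COREF" 0))) []
  PySem.List.sorted coref_list (fun x => toLex (x.1, x.2.1))

-- ===== PORT B =====
def get_coref_list_alt (entities : List (List (String × String))) (vocab : List (String × Int)) : List (Int × Int × Int) :=
  let cluster_ids : List String := entities.foldl (fun acc e => acc ++ [pvCid e]) []
  let n : Int := (cluster_ids.length : Int)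
  (PySem.List.pyRange 0 n).foldl (fun out i =>
    (PySem.List.pyRange (i + 1) n).foldl (fun out j =>
      if PySem.List.pyGetD cluster_ids i "" == PySem.List.pyGetD cluster_ids j "" then
        out ++ [(i, j, pvLookupD vocab "COREF" 0)]
      else out) out) []

-- ===== PRECONDITION & SPEC =====
-- Pre_ excludes exactly the inputs where the Python A raises a KeyError: an entity dict
-- without the key 'entity_id', or two entities in the same cluster while vocab lacks 'COREF'.
def Pre_get_coref_list (entities : List (List (String × String))) (vocab : List (String × Int)) : Prop :=
  (∀ e ∈ entities, ∃ p ∈ e, p.1 = "entity_id") ∧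
  (¬ (entities.map pvCid).Nodup → ∃ p ∈ vocab, p.1 = "COREF")
instance (entities : List (List (String × String))) (vocab : List (String × Int)) : Decidable (Pre_get_coref_list entities vocab) := by unfold Pre_get_coref_list; infer_instance

def pvWitness_get_coref_list : (List (List (String × String))) × (List (String × Int)) :=
  ([[("entity_id", "a-1")], [("entity_id", "a-2")], [("entity_id", "b-1")]], [("COREF", 7)])

def Spec_get_coref_list (entities : List (List (String × String))) (vocab : List (String × Int)) (out : List (Int × Int × Int)) : Prop := out = get_coref_list_alt entities vocab
instance (entities : List (List (String × String))) (vocab : List (String × Int)) (out : List (Int × Int × Int)) : Decidable (Spec_get_coref_list entities vocab out) := by unfold Spec_get_coref_list; infer_instance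

-- ===== CLAIM (what is proved, stated in full; the proofs are below) =====
def Claim_equal_get_coref_list : Prop := ∀ (entities : List (List (String × String))) (vocab : List (String × Int)), Dom_get_coref_list entities vocab → Pre_get_coref_list entities vocab → Spec_get_coref_list entities vocab (get_coref_list entities vocab)

-- ===== LEMMAS AND PROOFS =====

-- proof-side shorthands
def pvN (entities : List (List (String × String))) : Int := ((entities.map pvCid).length : Int)
def pvCidAt (entities : List (List (String × String))) (i : Int) : String :=
  PySem.List.pyGetD (entities.map pvCid) i ""
def pvC (vocab : List (String × Int)) : Int := pvLookupD vocab "COREF" 0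
def pvP (entities : List (List (String × String))) (vocab : List (String × Int)) (x : Int × Int × Int) : Prop :=
  ∃ i j : Int, 0 ≤ i ∧ i < j ∧ j < pvN entities ∧ pvCidAt entities i = pvCidAt entities j ∧ x = (i, j, pvC vocab)
def pvBlist (entities : List (List (String × String))) (vocab : List (String × Int)) : List (Int × Int × Int) :=
  (PySem.List.pyRange 0 (pvN entities)).flatMap (fun i =>
    ((PySem.List.pyRange (i + 1) (pvN entities)).filter
        (fun j => pvCidAt entities i == pvCidAt entities j)).map (fun j => (i, j, pvC vocab)))
def pvEnumMap (entities : List (List (String × String))) : List (String × Int) :=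
  (PySem.List.enumerate entities).map (fun p => (pvCid p.2, p.1))
def pvClusters (entities : List (List (String × String))) : PySem.Dict String (List Int) :=
  (pvEnumMap entities).foldl (fun d p => d.modify p.1 [] (fun x => x ++ [p.2])) PySem.Dict.empty
def pvAlist (entities : List (List (String × String))) (vocab : List (String × Int)) : List (Int × Int × Int) :=
  (pvClusters entities).keys.flatMap (fun k =>
    (pvComb2 ((pvClusters entities).getD k [])).map (fun ij =>
      if ij.1 < ij.2 then (ij.1, ij.2, pvC vocab) else (ij.2, ij.1, pvC vocab)))

theorem pv_mem_enumerate {α : Type} (xs : List α) (s i : Int) (a : α) :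
    (i, a) ∈ PySem.List.enumerate xs s ↔ s ≤ i ∧ i < s + xs.length ∧ xs[(i - s).toNat]? = some a := by
  induction xs generalizing s with
  | nil => simp [PySem.List.enumerate_nil]
  | cons x xs ih =>
    rw [PySem.List.enumerate_cons]
    simp only [List.mem_cons, ih, Prod.mk.injEq, List.length_cons]
    constructor
    · rintro (⟨rfl, rfl⟩ | ⟨h1, h2, h3⟩)
      · refine ⟨le_refl _, by push_cast; omega, ?_⟩
        simp
      · refine ⟨by omega, by push_cast at h2 ⊢; omega, ?_⟩
        have hk : (i - s).toNat = ((i - (s + 1)).toNat) + 1 := by omega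
        simp [hk, h3]
    · rintro ⟨h1, h2, h3⟩
      by_cases hi : i = s
      · subst hi
        simp at h3
        exact Or.inl ⟨rfl, h3.symm⟩
      · refine Or.inr ⟨by omega, by push_cast at h2 ⊢; omega, ?_⟩
        have hk : (i - s).toNat = ((i - (s + 1)).toNat) + 1 := by omega
        rw [hk] at h3
        simpa using h3

theorem pv_pairwise_enumerate {α : Type} (xs : List α) (s : Int) :
    List.Pairwise (fun p q => p.1 < q.1) (PySem.List.enumerate xs s) := by
  induction xs generalizing s with
  | nil => simp [PySem.List.enumerate_nil]
  | cons x xs ih =>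
    rw [PySem.List.enumerate_cons]
    refine List.Pairwise.cons (fun q hq => ?_) (ih (s + 1))
    have := (pv_mem_enumerate xs (s + 1) q.1 q.2).1 (by simpa using hq)
    simp only
    omega

theorem pv_mem_comb2 {α : Type} [LinearOrder α] (l : List α) (h : List.Pairwise (· < ·) l) (x y : α) :
    (x, y) ∈ pvComb2 l ↔ x ∈ l ∧ y ∈ l ∧ x < y := by
  induction l with
  | nil => simp [pvComb2]
  | cons z l ih =>
    rcases List.pairwise_cons.1 h with ⟨hz, hl⟩
    simp only [pvComb2, List.mem_append, List.mem_map, List.mem_cons, Prod.mk.injEq, ih hl]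
    constructor
    · rintro (⟨y', hy', rfl, rfl⟩ | ⟨hx, hy, hxy⟩)
      · exact ⟨Or.inl rfl, Or.inr hy', hz _ hy'⟩
      · exact ⟨Or.inr hx, Or.inr hy, hxy⟩
    · rintro ⟨hx | hx, hy | hy, hxy⟩
      · subst hx; subst hy; exact absurd hxy (lt_irrefl _)
      · subst hx; exact Or.inl ⟨y, hy, rfl, rfl⟩
      · subst hy; exact absurd (hxy.trans (hz _ hx)) (lt_irrefl _)
      · exact Or.inr ⟨hx, hy, hxy⟩

theorem pv_nodup_comb2 {α : Type} [LinearOrder α] (l : List α) (h : List.Pairwise (· < ·) l) :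
    (pvComb2 l).Nodup := by
  induction l with
  | nil => simp [pvComb2]
  | cons z l ih =>
    rcases List.pairwise_cons.1 h with ⟨hz, hl⟩
    refine List.Nodup.append ?_ (ih hl) ?_
    · exact (hl.nodup).map (fun a b hab => by simpa using hab)
    · intro p hp hp'
      rcases List.mem_map.1 hp with ⟨y', hy', rfl⟩
      have := ((pv_mem_comb2 l hl z y').1 hp').1
      exact absurd (hz _ this) (lt_irrefl _)

theorem pv_pairwise_pyRange (a b : Int) : List.Pairwise (· < ·) (PySem.List.pyRange a b) := by
  suffices H : ∀ (m : Nat) (a : Int), (b - a).toNat ≤ m → List.Pairwise (· < ·) (PySem.List.pyRange a b) from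
    H (b - a).toNat a le_rfl
  intro m
  induction m with
  | zero =>
    intro a ha
    simp [PySem.List.pyRange, show ¬ a < b from by omega]
  | succ m ih =>
    intro a ha
    by_cases hab : a < b
    · rw [PySem.List.pyRange_one_cons hab]
      refine List.Pairwise.cons (fun q hq => ?_) (ih (a + 1) (by omega))
      have := PySem.List.mem_pyRange_one.1 hq
      omega
    · simp [PySem.List.pyRange, show ¬ a < b from by omega]

-- pvCidAt at an in-range index is pvCid of the entity there
theorem pv_cidAt_eq (entities : List (List (String × String))) (i : Int) (a : List (String × String))
    (ha : entities[i.toNat]? = some a) (h0 : 0 ≤ i) (h1 : i < (entities.length : Int)) :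
    pvCidAt entities i = pvCid a := by
  unfold pvCidAt
  rw [PySem.List.pyGetD_eq_getElem _ _ h0 (by simpa using h1)]
  have : entities[i.toNat] = a := by
    have := List.getElem?_eq_getElem (l := entities) (i := i.toNat) (by omega)
    rw [this] at ha
    exact Option.some.inj ha
  simp [this]

theorem pv_grp_eq (entities : List (List (String × String))) (k : String) :
    (pvClusters entities).getD k [] =
      ((pvEnumMap entities).filter (fun p => p.1 == k)).map (fun p => p.2) := by
  unfold pvClusters
  rw [PySem.Dict.getD_foldl_modify_append]
  simp [PySem.Dict.getD_empty]

theorem pv_grp_mem (entities : List (List (String × String))) (k : String) (i : Int) :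
    i ∈ (pvClusters entities).getD k [] ↔ 0 ≤ i ∧ i < pvN entities ∧ pvCidAt entities i = k := by
  rw [pv_grp_eq]
  unfold pvEnumMap pvN
  simp only [List.mem_map, List.mem_filter, beq_iff_eq, List.length_map]
  constructor
  · rintro ⟨p, ⟨hp, hk⟩, rfl⟩
    rcases hp with ⟨q, hq, rfl⟩
    have hmem := (pv_mem_enumerate entities 0 q.1 q.2).1 (by simpa using hq)
    simp only at hk ⊢
    refine ⟨by omega, by omega, ?_⟩
    rw [pv_cidAt_eq entities q.1 q.2 (by simpa using hmem.2.2) (by omega) (by omega)]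
    exact hk
  · rintro ⟨h0, h1, hk⟩
    have hlt : i.toNat < entities.length := by omega
    refine ⟨(pvCid entities[i.toNat], i), ⟨⟨(i, entities[i.toNat]), ?_, rfl⟩, ?_⟩, rfl⟩
    · exact (pv_mem_enumerate entities 0 i entities[i.toNat]).2
        ⟨h0, by omega, by rw [Int.sub_zero]; exact List.getElem?_eq_getElem hlt⟩
    · simp only
      rw [← pv_cidAt_eq entities i entities[i.toNat]
        (List.getElem?_eq_getElem (l := entities) (i := i.toNat) hlt) h0 (by omega)]
      exact hk

theorem pv_grp_pairwise (entities : List (List (String × String))) (k : String) :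
    List.Pairwise (· < ·) ((pvClusters entities).getD k []) := by
  rw [pv_grp_eq]
  apply List.pairwise_map.2
  apply List.Pairwise.filter
  apply List.pairwise_map.2
  exact (pv_pairwise_enumerate entities 0).imp (fun h => h)

theorem pv_keys_eq (entities : List (List (String × String))) :
    (pvClusters entities).keys = PySem.Set.update (PySem.Dict.empty : PySem.Dict String (List Int)).keys ((pvEnumMap entities).map Prod.fst) :=
  PySem.Dict.keys_foldl_modify_key (pvEnumMap entities) Prod.fst [] (fun _ p => fun x => x ++ [p.2]) PySem.Dict.empty

theorem pv_keys_mem (entities : List (List (String × String))) (k : String) :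
    k ∈ (pvClusters entities).keys ↔ ∃ i : Int, 0 ≤ i ∧ i < pvN entities ∧ pvCidAt entities i = k := by
  rw [pv_keys_eq]
  rw [PySem.Dict.keys_empty]
  constructor
  · intro hk
    have : k ∈ ([] : List String) ∨ k ∈ (pvEnumMap entities).map Prod.fst :=
      (PySem.Set.mem_update _ _ _).1 hk
    rcases this with h | h
    · simp at h
    · unfold pvEnumMap at h
      rcases List.mem_map.1 h with ⟨p, hp, rfl⟩
      rcases List.mem_map.1 hp with ⟨q, hq, rfl⟩
      have hmem := (pv_mem_enumerate entities 0 q.1 q.2).1 (by simpa using hq)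
      refine ⟨q.1, by omega, by unfold pvN; simp only [List.length_map]; omega, ?_⟩
      exact pv_cidAt_eq entities q.1 q.2 (by simpa using hmem.2.2) (by omega) (by omega)
  · rintro ⟨i, h0, h1, hk⟩
    apply (PySem.Set.mem_update _ _ _).2
    refine Or.inr ?_
    unfold pvEnumMap
    have h1' : i.toNat < entities.length := by unfold pvN at h1; simp only [List.length_map] at h1; omega
    refine List.mem_map.2 ⟨(pvCid entities[i.toNat], i), List.mem_map.2 ⟨(i, entities[i.toNat]), ?_, rfl⟩, ?_⟩
    · exact (pv_mem_enumerate entities 0 i entities[i.toNat]).2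
        ⟨h0, by omega, by rw [Int.sub_zero]; exact List.getElem?_eq_getElem h1'⟩
    · simp only
      rw [← pv_cidAt_eq entities i entities[i.toNat]
        (List.getElem?_eq_getElem (l := entities) (i := i.toNat) h1') h0 (by omega)]
      exact hk

theorem pv_keys_nodup (entities : List (List (String × String))) :
    (pvClusters entities).keys.Nodup :=
  PySem.Dict.nodup_keys_foldl_modify_key (pvEnumMap entities) Prod.fst [] (fun _ p => fun x => x ++ [p.2]) PySem.Dict.empty
    (by rw [PySem.Dict.keys_empty]; exact List.nodup_nil)

theorem pv_A_eq (entities : List (List (String × String))) (vocab : List (String × Int)) :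
    get_coref_list entities vocab = PySem.List.sorted (pvAlist entities vocab) (fun x => toLex (x.1, x.2.1)) := by
  have hcl : (PySem.List.enumerate entities).foldl
      (fun d p => d.modify (pvCid p.2) [] (fun l => l ++ [p.1])) PySem.Dict.empty = pvClusters entities := by
    unfold pvClusters pvEnumMap
    rw [List.foldl_map]
  show PySem.List.sorted
      (List.foldl (fun acc kv =>
        acc ++ (pvComb2 kv.2).map (fun ij =>
          if ij.1 < ij.2 then (ij.1, ij.2, pvLookupD vocab "COREF" 0)
          else (ij.2, ij.1, pvLookupD vocab "COREF" 0))) []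
        ((List.foldl (fun d p => d.modify (pvCid p.2) [] (fun l => l ++ [p.1]))
          PySem.Dict.empty (PySem.List.enumerate entities)).items))
      (fun x => toLex (x.1, x.2.1)) = _
  rw [hcl]
  rw [PySem.Dict.items_eq_map_keys _ (pv_keys_nodup entities) []]
  rw [List.foldl_map]
  rw [show (fun (acc : List (Int × Int × Int)) (k : String) =>
        acc ++ (pvComb2 ((pvClusters entities).getD k [])).map (fun ij =>
          if ij.1 < ij.2 then (ij.1, ij.2, pvLookupD vocab "COREF" 0)
          else (ij.2, ij.1, pvLookupD vocab "COREF" 0))) =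
      (fun acc k => acc ++ (fun k => (pvComb2 ((pvClusters entities).getD k [])).map (fun ij =>
          if ij.1 < ij.2 then (ij.1, ij.2, pvLookupD vocab "COREF" 0)
          else (ij.2, ij.1, pvLookupD vocab "COREF" 0))) k) from rfl]
  rw [PySem.List.foldl_append_eq_flatMap]
  rfl

theorem pv_B_eq (entities : List (List (String × String))) (vocab : List (String × Int)) :
    get_coref_list_alt entities vocab = pvBlist entities vocab := by
  unfold get_coref_list_alt
  rw [PySem.List.foldl_append_singleton_eq_map, List.nil_append]
  rw [PySem.List.foldl_congr_mem _ _
      (fun (out : List (Int × Int × Int)) (i : Int) =>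
        out ++ ((PySem.List.pyRange (i + 1) ((entities.map pvCid).length : Int)).filter
          (fun j => PySem.List.pyGetD (entities.map pvCid) i "" == PySem.List.pyGetD (entities.map pvCid) j "")).map
          (fun j => (i, j, pvLookupD vocab "COREF" 0))) _
      (fun acc i _ => PySem.List.foldl_append_if _ _ _ _)]
  rw [PySem.List.foldl_append_eq_flatMap, List.nil_append]
  rfl

theorem pv_A_mem (entities : List (List (String × String))) (vocab : List (String × Int)) (x : Int × Int × Int) :
    x ∈ pvAlist entities vocab ↔ pvP entities vocab x := by
  unfold pvAlist pvP
  simp only [List.mem_flatMap, List.mem_map]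
  constructor
  · rintro ⟨k, hk, y, hy, rfl⟩
    have hmem := (pv_mem_comb2 _ (pv_grp_pairwise entities k) y.1 y.2).1 (by simpa using hy)
    rcases (pv_grp_mem entities k y.1).1 hmem.1 with ⟨h01, h11, hk1⟩
    rcases (pv_grp_mem entities k y.2).1 hmem.2.1 with ⟨h02, h12, hk2⟩
    refine ⟨y.1, y.2, h01, hmem.2.2, h12, by rw [hk1, hk2], ?_⟩
    simp [pvC, hmem.2.2]
  · rintro ⟨i, j, h0, hij, hjn, hcid, rfl⟩
    refine ⟨pvCidAt entities i, (pv_keys_mem entities _).2 ⟨i, h0, by omega, rfl⟩, (i, j), ?_, ?_⟩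
    · exact (pv_mem_comb2 _ (pv_grp_pairwise entities _) i j).2
        ⟨(pv_grp_mem entities _ i).2 ⟨h0, by omega, rfl⟩,
         (pv_grp_mem entities _ j).2 ⟨by omega, hjn, hcid.symm⟩, hij⟩
    · simp [pvC, hij]

theorem pv_B_mem (entities : List (List (String × String))) (vocab : List (String × Int)) (x : Int × Int × Int) :
    x ∈ pvBlist entities vocab ↔ pvP entities vocab x := by
  unfold pvBlist pvP
  simp only [List.mem_flatMap, List.mem_map, List.mem_filter, PySem.List.mem_pyRange_one, beq_iff_eq]
  constructor
  · rintro ⟨i, ⟨h0, hin⟩, j, ⟨⟨hj1, hj2⟩, hc⟩, rfl⟩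
    exact ⟨i, j, h0, by omega, hj2, hc, rfl⟩
  · rintro ⟨i, j, h0, hij, hjn, hc, rfl⟩
    exact ⟨i, ⟨h0, by omega⟩, j, ⟨⟨by omega, hjn⟩, hc⟩, rfl⟩

theorem pv_B_pairwise (entities : List (List (String × String))) (vocab : List (String × Int)) :
    List.Pairwise (fun a b => (fun x : Int × Int × Int => toLex (x.1, x.2.1)) a < (fun x : Int × Int × Int => toLex (x.1, x.2.1)) b)
      (pvBlist entities vocab) := by
  unfold pvBlist
  rw [List.pairwise_flatMap]
  constructor
  · intro i _
    apply List.pairwise_map.2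
    refine ((pv_pairwise_pyRange (i + 1) (pvN entities)).filter _).imp ?_
    intro j j' h
    exact Prod.Lex.lt_iff.2 (Or.inr ⟨rfl, h⟩)
  · refine (pv_pairwise_pyRange 0 (pvN entities)).imp ?_
    intro i i' hii x hx y hy
    rcases List.mem_map.1 hx with ⟨j, _, rfl⟩
    rcases List.mem_map.1 hy with ⟨j', _, rfl⟩
    exact Prod.Lex.lt_iff.2 (Or.inl hii)

theorem pv_A_nodup (entities : List (List (String × String))) (vocab : List (String × Int)) :
    (pvAlist entities vocab).Nodup := by
  unfold pvAlist
  rw [List.nodup_flatMap]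
  constructor
  · intro k _
    refine List.Nodup.map_on ?_ (pv_nodup_comb2 _ (pv_grp_pairwise entities k))
    intro y hy z hz hyz
    have hy' := (pv_mem_comb2 _ (pv_grp_pairwise entities k) y.1 y.2).1 (by simpa using hy)
    have hz' := (pv_mem_comb2 _ (pv_grp_pairwise entities k) z.1 z.2).1 (by simpa using hz)
    rw [if_pos hy'.2.2, if_pos hz'.2.2] at hyz
    simp only [Prod.mk.injEq] at hyz
    exact Prod.ext hyz.1 hyz.2.1
  · refine (pv_keys_nodup entities).imp ?_
    intro k k' hne x hx hx'
    rcases List.mem_map.1 hx with ⟨y, hy, rfl⟩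
    rcases List.mem_map.1 hx' with ⟨z, hz, hzy⟩
    have hy' := (pv_mem_comb2 _ (pv_grp_pairwise entities k) y.1 y.2).1 (by simpa using hy)
    have hz' := (pv_mem_comb2 _ (pv_grp_pairwise entities k') z.1 z.2).1 (by simpa using hz)
    have hky : pvCidAt entities y.1 = k := ((pv_grp_mem entities k y.1).1 hy'.1).2.2
    have hkz : pvCidAt entities z.1 = k' := ((pv_grp_mem entities k' z.1).1 hz'.1).2.2
    have hfst : z.1 = y.1 := by
      rw [if_pos hy'.2.2, if_pos hz'.2.2] at hzy
      simp only [Prod.mk.injEq] at hzy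
      exact hzy.1
    exact hne (by rw [← hky, ← hfst, hkz])

theorem pv_B_nodup (entities : List (List (String × String))) (vocab : List (String × Int)) :
    (pvBlist entities vocab).Nodup := by
  refine (pv_B_pairwise entities vocab).imp ?_
  intro a b hlt heq
  rw [heq] at hlt
  exact lt_irrefl _ hlt

-- ===== VERDICT (by name: the statement is the Claim_ definition above) =====
theorem get_coref_list_spec : Claim_equal_get_coref_list := by
  intro entities vocab _ _
  unfold Spec_get_coref_list
  rw [pv_A_eq, pv_B_eq]
  refine PySem.List.sorted_eq_of_perm_of_pairwise_lt _ _ _ ?_ (pv_B_pairwise entities vocab)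
  refine List.perm_of_nodup_nodup_toFinset_eq (pv_B_nodup entities vocab) (pv_A_nodup entities vocab) ?_
  ext x
  simp only [List.mem_toFinset, pv_A_mem, pv_B_mem]
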